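-- pv_equiv track=rewrite | github.com/HeoSeokYong/AlgorithmStudy | Dynamic_Programming/milk_city.py | solution
-- ===== SOURCE A (Python) =====
-- from typing import List, Tuple, Callable
--
-- def solution(N:int, city:List[List[int]]) -> int:
--     dp = [[0 for _ in range(N)] for _ in range(N)]
--
--     if city[0][0] == 0:
--         dp[0][0] = 1
--
--     for i in range(1, N):
--         dp[i][0] = dp[i-1][0] + (city[i][0] == (dp[i-1][0]) % 3)
--
--     for j in range(1, N):
--         dp[0][j] = dp[0][j-1] + (city[0][j] == (dp[0][j-1]) % 3)
--
--     for i in range(1, N):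
--         for j in range(1, N):
--             dp[i][j] = max(dp[i-1][j], dp[i][j-1])
--
--             if dp[i][j] % 3 == city[i][j]:
--                 dp[i][j] += 1
--
--     return dp[N-1][N-1]
-- ===== SOURCE B (Python) =====
-- def solution(N, city):
--     # Top-down memoized recursion: demand-driven evaluation from (N-1, N-1)
--     # with one uniform recurrence; the base case and the missing-neighbour
--     # defaults subsume A's separate boundary loops.
--     memo = {}
--
--     def f(i, j):
--         if (i, j) in memo:
--             return memo[(i, j)]
--         if i == 0 and j == 0:
--             v = 1 if city[0][0] == 0 else 0
--         else:
--             pred = max(f(i - 1, j) if i > 0 else 0,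
--                        f(i, j - 1) if j > 0 else 0)
--             v = pred + (1 if pred % 3 == city[i][j] else 0)
--         memo[(i, j)] = v
--         return v
--
--     return f(N - 1, N - 1)
-- ===== Notes on version B (the rewrite author's own statement) =====
-- stated objective: alternative
-- what changed: Replaces A's bottom-up table fill (three separate boundary loops plus a nested interior loop over an NxN array) by a top-down memoized recursion from (N-1,N-1) with one uniform recurrence in which missing neighbours default to 0.
import Mathlib
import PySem

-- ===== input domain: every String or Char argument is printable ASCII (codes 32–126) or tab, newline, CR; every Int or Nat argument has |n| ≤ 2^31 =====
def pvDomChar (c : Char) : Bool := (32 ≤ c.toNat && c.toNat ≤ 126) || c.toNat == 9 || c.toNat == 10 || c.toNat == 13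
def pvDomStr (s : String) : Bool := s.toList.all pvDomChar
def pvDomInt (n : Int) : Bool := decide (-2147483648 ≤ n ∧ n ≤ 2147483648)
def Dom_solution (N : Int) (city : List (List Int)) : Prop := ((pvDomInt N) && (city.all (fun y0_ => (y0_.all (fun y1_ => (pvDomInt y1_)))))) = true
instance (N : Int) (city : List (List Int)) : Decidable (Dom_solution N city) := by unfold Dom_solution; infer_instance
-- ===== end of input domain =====

-- B replaces A's bottom-up table fill (three boundary loops + nested interior loop)
-- by a top-down memoized recursion from (N-1,N-1) with one uniform recurrence.

-- city[i][j] accessor (indices in range under Pre_, so the default is never observed there)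
def cityAt (city : List (List Int)) (i j : Nat) : Int := (city.getD i []).getD j 0

-- ===== PORT A =====
-- Python '% 3' has a positive divisor, where Python's mod coincides with Lean's Int.emod '%', so '%' is exact here.
-- dp[i][j] read / write on the list-of-lists table (indices in range whenever A runs them)
def pvGet2 (dp : List (List Int)) (i j : Nat) : Int := (dp.getD i []).getD j 0
def pvSet2 (dp : List (List Int)) (i j : Nat) (v : Int) : List (List Int) :=
  dp.set i ((dp.getD i []).set j v)

def solution (N : Int) (city : List (List Int)) : Int :=
  let n := N.toNat
  -- dp = [[0]*N for _ in range(N)]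
  let dp : List (List Int) := List.replicate n (List.replicate n (0:Int))
  -- if city[0][0] == 0: dp[0][0] = 1
  let dp := if cityAt city 0 0 = 0 then pvSet2 dp 0 0 1 else dp
  -- for i in range(1, N): dp[i][0] = dp[i-1][0] + (city[i][0] == dp[i-1][0] % 3)
  let dp := (List.range' 1 (n-1)).foldl (fun dp i =>
    pvSet2 dp i 0 (pvGet2 dp (i-1) 0 +
      (if cityAt city i 0 = (pvGet2 dp (i-1) 0) % 3 then 1 else 0))) dp
  -- for j in range(1, N): dp[0][j] = dp[0][j-1] + (city[0][j] == dp[0][j-1] % 3)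
  let dp := (List.range' 1 (n-1)).foldl (fun dp j =>
    pvSet2 dp 0 j (pvGet2 dp 0 (j-1) +
      (if cityAt city 0 j = (pvGet2 dp 0 (j-1)) % 3 then 1 else 0))) dp
  -- nested loop: dp[i][j] = max(...); if dp[i][j] % 3 == city[i][j]: dp[i][j] += 1
  let dp := (List.range' 1 (n-1)).foldl (fun dp i =>
    (List.range' 1 (n-1)).foldl (fun dp j =>
      let dp' := pvSet2 dp i j (max (pvGet2 dp (i-1) j) (pvGet2 dp i (j-1)))
      if (pvGet2 dp' i j) % 3 = cityAt city i j then
        pvSet2 dp' i j (pvGet2 dp' i j + 1)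
      else dp') dp) dp
  pvGet2 dp (n-1) (n-1)

-- ===== PORT B =====
-- Source B's helper f(i, j): the memo dict only caches values of this pure recursion,
-- so the port is the recursion itself (same branches, same missing-neighbour defaults).
def fB (city : List (List Int)) (i j : Nat) : Int :=
  if i = 0 ∧ j = 0 then (if cityAt city 0 0 = 0 then 1 else 0)
  else
    let pred := max (if 0 < i then fB city (i-1) j else 0)
                    (if 0 < j then fB city i (j-1) else 0)
    pred + (if pred % 3 = cityAt city i j then 1 else 0)
termination_by (i, j)

-- return f(N-1, N-1)  (indices nonnegative under Pre_, where 1 ≤ N)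
def solution_alt (N : Int) (city : List (List Int)) : Int :=
  fB city (N.toNat - 1) (N.toNat - 1)

-- ===== PRECONDITION & SPEC =====
-- Pre_: exactly where Python A returns (otherwise city[…] or the final dp[N-1][N-1] raises IndexError)
def Pre_solution (N : Int) (city : List (List Int)) : Prop :=
  1 ≤ N ∧ N ≤ (city.length : Int) ∧ ∀ r ∈ city.take N.toNat, N ≤ (r.length : Int)
instance (N : Int) (city : List (List Int)) : Decidable (Pre_solution N city) := by
  unfold Pre_solution; infer_instance
def pvWitness_solution : Int × List (List Int) := (1, [[0]])

def Spec_solution (N : Int) (city : List (List Int)) (out : Int) : Prop := out = solution_alt N city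
instance (N : Int) (city : List (List Int)) (out : Int) : Decidable (Spec_solution N city out) := by
  unfold Spec_solution; infer_instance

-- ===== CLAIM (what is proved, stated in full; the proofs are below) =====
def Claim_equal_solution : Prop := ∀ (N : Int) (city : List (List Int)),
  Dom_solution N city → Pre_solution N city → Spec_solution N city (solution N city)

-- ===== LEMMAS AND PROOFS =====

-- the common DP recurrence: g c i j = best milk count on a path to cell (i,j)
def g (c : Nat → Nat → Int) : Nat → Nat → Int
  | 0, 0 => if c 0 0 = 0 then 1 else 0
  | i+1, 0 => g c i 0 + (if c (i+1) 0 = (g c i 0) % 3 then 1 else 0)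
  | 0, j+1 => g c 0 j + (if c 0 (j+1) = (g c 0 j) % 3 then 1 else 0)
  | i+1, j+1 =>
      let p := max (g c i (j+1)) (g c (i+1) j)
      if p % 3 = c (i+1) (j+1) then p + 1 else p
termination_by i j => (i, j)

theorem g_nonneg (c : Nat → Nat → Int) (i j : Nat) : 0 ≤ g c i j := by
  fun_induction g c i j <;> (try dsimp only) <;> (try split) <;> omega

-- B's recursion computes g
theorem fB_eq_g_aux (city : List (List Int)) :
    ∀ n i j, i + j ≤ n → fB city i j = g (cityAt city) i j := by
  intro n
  induction n with
  | zero =>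
    intro i j hij
    obtain rfl : i = 0 := by omega
    obtain rfl : j = 0 := by omega
    rw [fB, if_pos ⟨rfl, rfl⟩, g]
  | succ n ih =>
    intro i j hij
    rcases Nat.eq_zero_or_pos i with rfl | hi <;> rcases Nat.eq_zero_or_pos j with rfl | hj
    · rw [fB, if_pos ⟨rfl, rfl⟩, g]
    · obtain ⟨j', rfl⟩ : ∃ j', j = j' + 1 := ⟨j - 1, by omega⟩
      rw [fB, if_neg (by omega)]
      dsimp only
      rw [if_neg (by omega : ¬(0:Nat) < 0), if_pos (by omega : 0 < j' + 1)]
      have h' : j' + 1 - 1 = j' := by omega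
      rw [h', ih 0 j' (by omega), max_eq_right (g_nonneg (cityAt city) 0 j')]
      conv_rhs => rw [g]
      split_ifs <;> omega
    · obtain ⟨i', rfl⟩ : ∃ i', i = i' + 1 := ⟨i - 1, by omega⟩
      rw [fB, if_neg (by omega)]
      dsimp only
      rw [if_pos (by omega : 0 < i' + 1), if_neg (by omega : ¬(0:Nat) < 0)]
      have h' : i' + 1 - 1 = i' := by omega
      rw [h', ih i' 0 (by omega), max_eq_left (g_nonneg (cityAt city) i' 0)]
      conv_rhs => rw [g]
      split_ifs <;> omega
    · obtain ⟨i', rfl⟩ : ∃ i', i = i' + 1 := ⟨i - 1, by omega⟩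
      obtain ⟨j', rfl⟩ : ∃ j', j = j' + 1 := ⟨j - 1, by omega⟩
      rw [fB, if_neg (by omega)]
      dsimp only
      rw [if_pos (by omega : 0 < i' + 1), if_pos (by omega : 0 < j' + 1)]
      have h1 : i' + 1 - 1 = i' := by omega
      have h2 : j' + 1 - 1 = j' := by omega
      rw [h1, h2, ih i' (j' + 1) (by omega), ih (i' + 1) j' (by omega)]
      conv_rhs => rw [g]
      split_ifs <;> omega

theorem fB_eq_g (city : List (List Int)) (i j : Nat) :
    fB city i j = g (cityAt city) i j :=
  fB_eq_g_aux city (i + j) i j le_rfl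

-- shape of the dp table
def Shape (dp : List (List Int)) (n : Nat) : Prop :=
  dp.length = n ∧ ∀ r ∈ dp, r.length = n

theorem getD_set_self {l : List Int} {i : Nat} (v d : Int) (h : i < l.length) :
    (l.set i v).getD i d = v := by
  simp [List.getD_eq_getElem?_getD, List.getElem?_set_self h]

theorem getD_set_ne {l : List Int} {i a : Nat} (v d : Int) (h : i ≠ a) :
    (l.set i v).getD a d = l.getD a d := by
  simp [List.getD_eq_getElem?_getD, List.getElem?_set_ne h]

theorem getDL_set_self {l : List (List Int)} {i : Nat} (v d : List Int) (h : i < l.length) :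
    (l.set i v).getD i d = v := by
  simp [List.getD_eq_getElem?_getD, List.getElem?_set_self h]

theorem getDL_set_ne {l : List (List Int)} {i a : Nat} (v d : List Int) (h : i ≠ a) :
    (l.set i v).getD a d = l.getD a d := by
  simp [List.getD_eq_getElem?_getD, List.getElem?_set_ne h]

theorem shape_set2 {dp : List (List Int)} {n i j : Nat} (h : Shape dp n) (hi : i < n) (v : Int) :
    Shape (pvSet2 dp i j v) n := by
  obtain ⟨hl, hr⟩ := h
  have hidp : i < dp.length := by omega
  refine ⟨by simp [pvSet2, hl], ?_⟩
  intro r hrmem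
  rcases List.mem_or_eq_of_mem_set hrmem with hm | rfl
  · exact hr r hm
  · rw [List.length_set]
    exact hr _ (by rw [List.getD_eq_getElem?_getD, List.getElem?_eq_getElem hidp]; exact List.getElem_mem hidp)

theorem get2_set2 {dp : List (List Int)} {n : Nat} (h : Shape dp n) {i j : Nat}
    (hi : i < n) (hj : j < n) (v : Int) (a b : Nat) :
    pvGet2 (pvSet2 dp i j v) a b = if a = i ∧ b = j then v else pvGet2 dp a b := by
  obtain ⟨hl, hr⟩ := h
  have hidp : i < dp.length := by omega
  have hrow : (dp.getD i []).length = n := by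
    rw [List.getD_eq_getElem?_getD, List.getElem?_eq_getElem hidp]
    exact hr _ (List.getElem_mem hidp)
  unfold pvGet2 pvSet2
  by_cases hai : a = i
  · subst hai
    rw [getDL_set_self _ _ hidp]
    by_cases hbj : b = j
    · subst hbj
      rw [getD_set_self _ _ (by omega)]
      simp
    · rw [getD_set_ne _ _ (fun hh => hbj hh.symm)]
      simp [hbj]
  · rw [getDL_set_ne _ _ (fun hh => hai hh.symm)]
    simp [hai]

theorem get2_replicate (n : Nat) (a b : Nat) :
    pvGet2 (List.replicate n (List.replicate n (0:Int))) a b = 0 := by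
  unfold pvGet2
  by_cases h : a < n <;> by_cases h2 : b < n <;>
    simp [List.getD_eq_getElem?_getD, h, h2]

theorem shape_replicate (n : Nat) :
    Shape (List.replicate n (List.replicate n (0:Int))) n := by
  constructor
  · simp
  · intro r hr
    rw [List.eq_of_mem_replicate hr]
    simp

-- stage 1: after the city[0][0] test
theorem stage1 (c : Nat → Nat → Int) (n : Nat) (hn : 0 < n) :
    Shape (if c 0 0 = 0 then pvSet2 (List.replicate n (List.replicate n (0:Int))) 0 0 1
           else List.replicate n (List.replicate n (0:Int))) n ∧
    ∀ a b, a < n → b < n →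
      pvGet2 (if c 0 0 = 0 then pvSet2 (List.replicate n (List.replicate n (0:Int))) 0 0 1
              else List.replicate n (List.replicate n (0:Int))) a b
        = if b = 0 ∧ a ≤ 0 then g c a 0 else 0 := by
  have hg0 : ∀ a b : Nat, (if b = 0 ∧ a ≤ 0 then g c a 0 else 0) = (if a = 0 ∧ b = 0 then g c 0 0 else 0) := by
    intro a b
    by_cases hA : a = 0 <;> by_cases hB : b = 0 <;> subst_eqs <;> split_ifs <;> first | rfl | omega
  split_ifs with h0
  · refine ⟨shape_set2 (shape_replicate n) hn 1, ?_⟩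
    intro a b ha hb
    rw [hg0, get2_set2 (shape_replicate n) hn hn 1 a b, get2_replicate]
    have hgv : g c 0 0 = 1 := by rw [g, if_pos h0]
    rw [hgv]
  · refine ⟨shape_replicate n, ?_⟩
    intro a b ha hb
    rw [hg0, get2_replicate]
    have hgv : g c 0 0 = 0 := by rw [g, if_neg h0]
    split_ifs <;> omega

-- stage 2: one step of the first-column loop
theorem stageColStep (c : Nat → Nat → Int) (n m : Nat) (hm : m + 1 ≤ n - 1)
    (dp : List (List Int)) (hs : Shape dp n)
    (hg : ∀ a b, a < n → b < n → pvGet2 dp a b = if b = 0 ∧ a ≤ m then g c a 0 else 0) :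
    Shape (pvSet2 dp (1+m) 0 (pvGet2 dp (1+m-1) 0 +
      (if c (1+m) 0 = (pvGet2 dp (1+m-1) 0) % 3 then 1 else 0))) n ∧
    ∀ a b, a < n → b < n →
      pvGet2 (pvSet2 dp (1+m) 0 (pvGet2 dp (1+m-1) 0 +
        (if c (1+m) 0 = (pvGet2 dp (1+m-1) 0) % 3 then 1 else 0))) a b
      = if b = 0 ∧ a ≤ m + 1 then g c a 0 else 0 := by
  have hmn : 1 + m < n := by omega
  refine ⟨shape_set2 hs hmn _, ?_⟩
  intro a b ha hb
  rw [get2_set2 hs hmn (by omega) _ a b]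
  have h' : 1 + m - 1 = m := by omega
  have hprev : pvGet2 dp m 0 = g c m 0 := by
    rw [hg m 0 (by omega) (by omega), if_pos ⟨rfl, le_refl m⟩]
  rw [h', hprev]
  have hval : g c m 0 + (if c (1+m) 0 = g c m 0 % 3 then 1 else 0) = g c (1+m) 0 := by
    have h'' : 1 + m = m + 1 := by omega
    rw [h'']
    conv_rhs => rw [g]
  rw [hval, hg a b ha hb]
  by_cases hA : a = 1 + m ∧ b = 0
  · obtain ⟨rfl, rfl⟩ := hA
    rw [if_pos ⟨rfl, rfl⟩, if_pos ⟨rfl, by omega⟩]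
  · rw [if_neg hA]
    split_ifs <;> first | rfl | omega

theorem stageCol (c : Nat → Nat → Int) (n : Nat) (dp1 : List (List Int))
    (hs : Shape dp1 n)
    (h1 : ∀ a b, a < n → b < n → pvGet2 dp1 a b = if b = 0 ∧ a ≤ 0 then g c a 0 else 0) :
    ∀ m, m ≤ n - 1 →
      Shape ((List.range' 1 m).foldl (fun dp i =>
        pvSet2 dp i 0 (pvGet2 dp (i-1) 0 +
          (if c i 0 = (pvGet2 dp (i-1) 0) % 3 then 1 else 0))) dp1) n ∧
      ∀ a b, a < n → b < n →
        pvGet2 ((List.range' 1 m).foldl (fun dp i =>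
          pvSet2 dp i 0 (pvGet2 dp (i-1) 0 +
            (if c i 0 = (pvGet2 dp (i-1) 0) % 3 then 1 else 0))) dp1) a b
        = if b = 0 ∧ a ≤ m then g c a 0 else 0 := by
  intro m
  induction m with
  | zero =>
    intro _
    rw [List.range'_zero, List.foldl_nil]
    exact ⟨hs, h1⟩
  | succ m ih =>
    intro hm
    obtain ⟨ihs, ihg⟩ := ih (by omega)
    have hcat : List.range' 1 (m+1) = List.range' 1 m ++ [1+m] := by
      rw [List.range'_concat]; simp
    rw [hcat, List.foldl_append, List.foldl_cons, List.foldl_nil]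
    exact stageColStep c n m hm _ ihs ihg

-- stage 3: one step of the first-row loop
theorem stageRowStep (c : Nat → Nat → Int) (n m : Nat) (hm : m + 1 ≤ n - 1)
    (dp : List (List Int)) (hs : Shape dp n)
    (hg : ∀ a b, a < n → b < n →
      pvGet2 dp a b = if b = 0 then g c a 0 else if a = 0 ∧ b ≤ m then g c 0 b else 0) :
    Shape (pvSet2 dp 0 (1+m) (pvGet2 dp 0 (1+m-1) +
      (if c 0 (1+m) = (pvGet2 dp 0 (1+m-1)) % 3 then 1 else 0))) n ∧
    ∀ a b, a < n → b < n →
      pvGet2 (pvSet2 dp 0 (1+m) (pvGet2 dp 0 (1+m-1) +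
        (if c 0 (1+m) = (pvGet2 dp 0 (1+m-1)) % 3 then 1 else 0))) a b
      = if b = 0 then g c a 0 else if a = 0 ∧ b ≤ m + 1 then g c 0 b else 0 := by
  have hmn : 1 + m < n := by omega
  refine ⟨shape_set2 hs (by omega) _, ?_⟩
  intro a b ha hb
  rw [get2_set2 hs (by omega) hmn _ a b]
  have h' : 1 + m - 1 = m := by omega
  have hprev : pvGet2 dp 0 m = g c 0 m := by
    rw [hg 0 m (by omega) (by omega)]
    rcases Nat.eq_zero_or_pos m with rfl | hM
    · rw [if_pos rfl]
    · rw [if_neg (by omega), if_pos ⟨rfl, le_refl m⟩]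
  rw [h', hprev]
  have hval : g c 0 m + (if c 0 (1+m) = g c 0 m % 3 then 1 else 0) = g c 0 (1+m) := by
    have h'' : 1 + m = m + 1 := by omega
    rw [h'']
    conv_rhs => rw [g]
  rw [hval, hg a b ha hb]
  by_cases hA : a = 0 ∧ b = 1 + m
  · obtain ⟨rfl, rfl⟩ := hA
    rw [if_pos ⟨rfl, rfl⟩, if_neg (by omega), if_pos ⟨rfl, by omega⟩]
  · rw [if_neg hA]
    split_ifs <;> first | rfl | omega

theorem stageRow (c : Nat → Nat → Int) (n : Nat) (dp2 : List (List Int))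
    (hs : Shape dp2 n)
    (h2 : ∀ a b, a < n → b < n →
      pvGet2 dp2 a b = if b = 0 then g c a 0 else if a = 0 ∧ b ≤ 0 then g c 0 b else 0) :
    ∀ m, m ≤ n - 1 →
      Shape ((List.range' 1 m).foldl (fun dp j =>
        pvSet2 dp 0 j (pvGet2 dp 0 (j-1) +
          (if c 0 j = (pvGet2 dp 0 (j-1)) % 3 then 1 else 0))) dp2) n ∧
      ∀ a b, a < n → b < n →
        pvGet2 ((List.range' 1 m).foldl (fun dp j =>
          pvSet2 dp 0 j (pvGet2 dp 0 (j-1) +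
            (if c 0 j = (pvGet2 dp 0 (j-1)) % 3 then 1 else 0))) dp2) a b
        = if b = 0 then g c a 0 else if a = 0 ∧ b ≤ m then g c 0 b else 0 := by
  intro m
  induction m with
  | zero =>
    intro _
    rw [List.range'_zero, List.foldl_nil]
    exact ⟨hs, h2⟩
  | succ m ih =>
    intro hm
    obtain ⟨ihs, ihg⟩ := ih (by omega)
    have hcat : List.range' 1 (m+1) = List.range' 1 m ++ [1+m] := by
      rw [List.range'_concat]; simp
    rw [hcat, List.foldl_append, List.foldl_cons, List.foldl_nil]
    exact stageRowStep c n m hm _ ihs ihg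

-- stage 4: one step of the inner interior loop (row i, column 1+k)
theorem stageInnerStep (c : Nat → Nat → Int) (n i k : Nat) (hi1 : 1 ≤ i) (hin : i ≤ n - 1)
    (hk : k + 1 ≤ n - 1) (dp : List (List Int)) (hs : Shape dp n)
    (hg : ∀ a b, a < n → b < n →
      pvGet2 dp a b = if b = 0 ∨ a = 0 ∨ a < i ∨ (a = i ∧ b ≤ k) then g c a b else 0) :
    Shape ((fun dp j =>
        let dp' := pvSet2 dp i j (max (pvGet2 dp (i-1) j) (pvGet2 dp i (j-1)))
        if (pvGet2 dp' i j) % 3 = c i j then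
          pvSet2 dp' i j (pvGet2 dp' i j + 1)
        else dp') dp (1+k)) n ∧
    ∀ a b, a < n → b < n →
      pvGet2 ((fun dp j =>
        let dp' := pvSet2 dp i j (max (pvGet2 dp (i-1) j) (pvGet2 dp i (j-1)))
        if (pvGet2 dp' i j) % 3 = c i j then
          pvSet2 dp' i j (pvGet2 dp' i j + 1)
        else dp') dp (1+k)) a b
      = if b = 0 ∨ a = 0 ∨ a < i ∨ (a = i ∧ b ≤ k + 1) then g c a b else 0 := by
  have hin' : i < n := by omega
  have hkn : 1 + k < n := by omega
  dsimp only
  have hup : pvGet2 dp (i-1) (1+k) = g c (i-1) (1+k) := by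
    rw [hg (i-1) (1+k) (by omega) hkn, if_pos (by omega)]
  have hleft : pvGet2 dp i (1+k-1) = g c i k := by
    have h' : 1 + k - 1 = k := by omega
    rw [h', hg i k (by omega) (by omega), if_pos (by omega)]
  rw [hup, hleft]
  have hsets : Shape (pvSet2 dp i (1+k) (max (g c (i-1) (1+k)) (g c i k))) n :=
    shape_set2 hs hin' _
  have hvij : pvGet2 (pvSet2 dp i (1+k) (max (g c (i-1) (1+k)) (g c i k))) i (1+k)
      = max (g c (i-1) (1+k)) (g c i k) := by
    rw [get2_set2 hs hin' hkn _ i (1+k), if_pos ⟨rfl, rfl⟩]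
  rw [hvij]
  have hgik : g c i (1+k) = if (max (g c (i-1) (1+k)) (g c i k)) % 3 = c i (1+k)
      then max (g c (i-1) (1+k)) (g c i k) + 1 else max (g c (i-1) (1+k)) (g c i k) := by
    obtain ⟨i', rfl⟩ : ∃ i', i = i' + 1 := ⟨i - 1, by omega⟩
    have h1 : 1 + k = k + 1 := by omega
    have h2 : i' + 1 - 1 = i' := by omega
    rw [h1, h2]
    rw [g]
  constructor
  · split_ifs
    · exact shape_set2 hsets hin' _
    · exact hsets
  · intro a b ha hb
    by_cases hc : (max (g c (i-1) (1+k)) (g c i k)) % 3 = c i (1+k)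
    · rw [if_pos hc, get2_set2 hsets hin' hkn _ a b, get2_set2 hs hin' hkn _ a b]
      by_cases hA : a = i ∧ b = 1 + k
      · obtain ⟨rfl, rfl⟩ := hA
        rw [if_pos (⟨rfl, rfl⟩ : a = a ∧ 1 + k = 1 + k)]
        rw [if_pos (show 1 + k = 0 ∨ a = 0 ∨ a < a ∨ (a = a ∧ 1 + k ≤ k + 1) by omega)]
        rw [hgik, if_pos hc]
      · rw [if_neg hA, if_neg hA, hg a b ha hb]
        split_ifs <;> first | rfl | omega
    · rw [if_neg hc, get2_set2 hs hin' hkn _ a b]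
      by_cases hA : a = i ∧ b = 1 + k
      · obtain ⟨rfl, rfl⟩ := hA
        rw [if_pos (⟨rfl, rfl⟩ : a = a ∧ 1 + k = 1 + k)]
        rw [if_pos (show 1 + k = 0 ∨ a = 0 ∨ a < a ∨ (a = a ∧ 1 + k ≤ k + 1) by omega)]
        rw [hgik, if_neg hc]
      · rw [if_neg hA, hg a b ha hb]
        split_ifs <;> first | rfl | omega

-- stage 4: the inner interior loop
theorem stageInner (c : Nat → Nat → Int) (n : Nat) (i : Nat) (hi1 : 1 ≤ i) (hin : i ≤ n - 1)
    (dp0 : List (List Int)) (hs : Shape dp0 n)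
    (hI : ∀ a b, a < n → b < n →
      pvGet2 dp0 a b = if b = 0 ∨ a = 0 ∨ a < i then g c a b else 0) :
    ∀ k, k ≤ n - 1 →
      Shape ((List.range' 1 k).foldl (fun dp j =>
        let dp' := pvSet2 dp i j (max (pvGet2 dp (i-1) j) (pvGet2 dp i (j-1)))
        if (pvGet2 dp' i j) % 3 = c i j then
          pvSet2 dp' i j (pvGet2 dp' i j + 1)
        else dp') dp0) n ∧
      ∀ a b, a < n → b < n →
        pvGet2 ((List.range' 1 k).foldl (fun dp j =>
          let dp' := pvSet2 dp i j (max (pvGet2 dp (i-1) j) (pvGet2 dp i (j-1)))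
          if (pvGet2 dp' i j) % 3 = c i j then
            pvSet2 dp' i j (pvGet2 dp' i j + 1)
          else dp') dp0) a b
        = if b = 0 ∨ a = 0 ∨ a < i ∨ (a = i ∧ b ≤ k) then g c a b else 0 := by
  intro k
  induction k with
  | zero =>
    intro _
    rw [List.range'_zero, List.foldl_nil]
    refine ⟨hs, ?_⟩
    intro a b ha hb
    rw [hI a b ha hb]
    split_ifs <;> first | rfl | omega
  | succ k ih =>
    intro hk
    obtain ⟨ihs, ihg⟩ := ih (by omega)
    have hcat : List.range' 1 (k+1) = List.range' 1 k ++ [1+k] := by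
      rw [List.range'_concat]; simp
    rw [hcat, List.foldl_append, List.foldl_cons, List.foldl_nil]
    exact stageInnerStep c n i k hi1 hin hk _ ihs ihg

-- stage 4: the outer interior loop
theorem stageNested (c : Nat → Nat → Int) (n : Nat) (dp3 : List (List Int))
    (hs : Shape dp3 n)
    (h3 : ∀ a b, a < n → b < n →
      pvGet2 dp3 a b = if b = 0 then g c a 0 else if a = 0 ∧ b ≤ n - 1 then g c 0 b else 0) :
    ∀ m, m ≤ n - 1 →
      Shape ((List.range' 1 m).foldl (fun dp i =>
        (List.range' 1 (n-1)).foldl (fun dp j =>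
          let dp' := pvSet2 dp i j (max (pvGet2 dp (i-1) j) (pvGet2 dp i (j-1)))
          if (pvGet2 dp' i j) % 3 = c i j then
            pvSet2 dp' i j (pvGet2 dp' i j + 1)
          else dp') dp) dp3) n ∧
      ∀ a b, a < n → b < n →
        pvGet2 ((List.range' 1 m).foldl (fun dp i =>
          (List.range' 1 (n-1)).foldl (fun dp j =>
            let dp' := pvSet2 dp i j (max (pvGet2 dp (i-1) j) (pvGet2 dp i (j-1)))
            if (pvGet2 dp' i j) % 3 = c i j then
              pvSet2 dp' i j (pvGet2 dp' i j + 1)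
            else dp') dp) dp3) a b
        = if b = 0 ∨ a = 0 ∨ a ≤ m then g c a b else 0 := by
  intro m
  induction m with
  | zero =>
    intro _
    rw [List.range'_zero, List.foldl_nil]
    refine ⟨hs, ?_⟩
    intro a b ha hb
    rw [h3 a b ha hb]
    rcases Nat.eq_zero_or_pos b with rfl | hB <;> rcases Nat.eq_zero_or_pos a with rfl | hA <;>
      split_ifs <;> first | rfl | omega
  | succ m ih =>
    intro hm
    obtain ⟨ihs, ihg⟩ := ih (by omega)
    have hcat : List.range' 1 (m+1) = List.range' 1 m ++ [1+m] := by
      rw [List.range'_concat]; simp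
    rw [hcat, List.foldl_append, List.foldl_cons, List.foldl_nil]
    obtain ⟨hs', hg'⟩ := stageInner c n (1+m) (by omega) (by omega) _ ihs
      (fun a b ha hb => by rw [ihg a b ha hb]; split_ifs <;> first | rfl | omega)
      (n-1) le_rfl
    refine ⟨hs', ?_⟩
    intro a b ha hb
    rw [hg' a b ha hb]
    split_ifs <;> first | rfl | omega

theorem solution_eq_g (N : Int) (city : List (List Int)) (hN : 1 ≤ N) :
    solution N city = g (cityAt city) (N.toNat - 1) (N.toNat - 1) := by
  have hn : 0 < N.toNat := by omega
  simp only [solution]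
  obtain ⟨hs1, hg1⟩ := stage1 (cityAt city) N.toNat hn
  obtain ⟨hs2, hg2⟩ := stageCol (cityAt city) N.toNat _ hs1 hg1 (N.toNat - 1) le_rfl
  obtain ⟨hs3, hg3⟩ := stageRow (cityAt city) N.toNat _ hs2
    (fun a b ha hb => by rw [hg2 a b ha hb]; split_ifs <;> first | rfl | omega)
    (N.toNat - 1) le_rfl
  obtain ⟨hs4, hg4⟩ := stageNested (cityAt city) N.toNat _ hs3 hg3 (N.toNat - 1) le_rfl
  rw [hg4 (N.toNat - 1) (N.toNat - 1) (by omega) (by omega), if_pos (by omega)]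

-- ===== VERDICT (by name: the statement is the Claim_ definition above) =====
theorem solution_spec : Claim_equal_solution := by
  intro N city _ hpre
  unfold Spec_solution solution_alt
  rw [solution_eq_g N city hpre.1, fB_eq_g]
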